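-- pv_equiv track=rewrite | github.com/saba1999AI/Text-to-Video-Generation | data_preprocess/step4_get_mask.py | estimate_num_people
-- ===== SOURCE A (Python) =====
-- def estimate_num_people(data):
--     max_people_PlanA = 0
--     max_people_PlanB = 0
--     max_people_PlanC = 0
--     for frame_id, objects in data.items():
--         num_persons = len(objects.get('person', []))
--         num_heads = len(objects.get('head', []))
--         num_faces = len(objects.get('face', []))
--         if num_persons == num_heads == num_faces:
--             max_people_PlanA = max(max_people_PlanA, num_persons)
--         if num_persons == num_heads:
--             max_people_PlanB = max(max_people_PlanB, num_persons)
--         if num_persons == num_faces: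
--             max_people_PlanC = max(max_people_PlanC, num_persons)
--     if max_people_PlanA != 0:
--         return max_people_PlanA
--     elif max_people_PlanB != 0:
--         return max_people_PlanB
--     else:
--         return max_people_PlanC
-- ===== SOURCE B (Python) =====
-- def estimate_num_people(data):
--     # Sort per-frame count triples by person-count descending; in a descending list
--     # the FIRST qualifying triple carries the maximum qualifying person-count, so
--     # each plan's maximum becomes a first-match scan instead of a running maximum.
--     triples = sorted(((len(o.get('person', [])), len(o.get('head', [])), len(o.get('face', [])))
--                       for o in data.values()),
--                      key=lambda t: t[0], reverse=True)
--     for cond in (lambda p, h, f: p == h == f,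
--                  lambda p, h, f: p == h,
--                  lambda p, h, f: p == f):
--         n = next((p for p, h, f in triples if cond(p, h, f)), 0)
--         if n != 0:
--             return n
--     return 0
-- ===== Notes on version B (the rewrite author's own statement) =====
-- stated objective: alternative
-- what changed: Instead of a single pass carrying three running maxima, B sorts the per-frame count triples by person-count descending once and then answers each plan by a first-match scan (next with default 0), returning the first plan whose first match is nonzero.
import Mathlib
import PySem

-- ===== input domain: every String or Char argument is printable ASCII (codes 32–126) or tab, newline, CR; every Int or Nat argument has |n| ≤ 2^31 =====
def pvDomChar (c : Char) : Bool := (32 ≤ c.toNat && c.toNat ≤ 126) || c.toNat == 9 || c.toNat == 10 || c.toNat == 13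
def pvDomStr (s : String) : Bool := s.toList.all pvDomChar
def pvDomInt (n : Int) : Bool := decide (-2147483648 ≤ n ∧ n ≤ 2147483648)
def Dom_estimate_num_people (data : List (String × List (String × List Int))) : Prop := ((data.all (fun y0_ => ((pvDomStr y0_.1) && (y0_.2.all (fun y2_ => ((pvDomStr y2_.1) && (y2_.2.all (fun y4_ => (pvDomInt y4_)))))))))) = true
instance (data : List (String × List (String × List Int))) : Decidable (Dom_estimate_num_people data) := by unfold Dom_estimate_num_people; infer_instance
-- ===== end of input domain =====

-- B replaces A's single fused loop (three running maxima) with one descending sort of the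
-- per-frame count triples followed by three first-match scans; objective: alternative.

-- len(objects.get(k, [])) — dict lookup is first match in the association list (exact for Python dicts, which have unique keys)
def pvLen (o : List (String × List Int)) (k : String) : Int :=
  (((o.find? (fun kv => kv.1 == k)).map Prod.snd).getD []).length

-- ===== PORT A =====
def estimate_num_people (data : List (String × List (String × List Int))) : Int :=
  let r := data.foldl (fun (acc : Int × Int × Int) fr =>
    let np := pvLen fr.2 "person"
    let nh := pvLen fr.2 "head"
    let nf := pvLen fr.2 "face"
    (if np == nh && nh == nf then max acc.1 np else acc.1,
     if np == nh then max acc.2.1 np else acc.2.1,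
     if np == nf then max acc.2.2 np else acc.2.2)) (0, 0, 0)
  if r.1 ≠ 0 then r.1 else if r.2.1 ≠ 0 then r.2.1 else r.2.2

-- ===== PORT B =====
-- the generator of per-frame count triples
def pvCounts (data : List (String × List (String × List Int))) : List (Int × Int × Int) :=
  data.map (fun fr => (pvLen fr.2 "person", pvLen fr.2 "head", pvLen fr.2 "face"))

-- next((p for p,h,f in triples if cond(p,h,f)), 0)
def pvFirst (cond : Int × Int × Int → Bool) (triples : List (Int × Int × Int)) : Int :=
  ((triples.find? cond).map Prod.fst).getD 0

def estimate_num_people_alt (data : List (String × List (String × List Int))) : Int :=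
  let triples := PySem.List.sorted (pvCounts data) (fun t => t.1) true
  let conds : List (Int × Int × Int → Bool) :=
    [fun t => t.1 == t.2.1 && t.2.1 == t.2.2,
     fun t => t.1 == t.2.1,
     fun t => t.1 == t.2.2]
  -- the for-loop with early return on n != 0, falling through to 0
  match conds.findSome? (fun cond =>
      let n := pvFirst cond triples
      if n ≠ 0 then some n else none) with
  | some n => n
  | none => 0

-- ===== PRECONDITION & SPEC =====
def Spec_estimate_num_people (data : List (String × List (String × List Int))) (out : Int) : Prop := out = estimate_num_people_alt data
instance (data : List (String × List (String × List Int))) (out : Int) : Decidable (Spec_estimate_num_people data out) := by unfold Spec_estimate_num_people; infer_instance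

-- ===== CLAIM (what is proved, stated in full; the proofs are below) =====
def Claim_equal_estimate_num_people : Prop := ∀ (data : List (String × List (String × List Int))), Dom_estimate_num_people data → Spec_estimate_num_people data (estimate_num_people data)

-- ===== LEMMAS AND PROOFS =====

-- the filtered maximum A's loop maintains, with arbitrary starting accumulator
def pvMaxFrom (p : Int × Int × Int → Bool) (cs : List (Int × Int × Int)) (a : Int) : Int :=
  ((cs.filter p).map Prod.fst).foldl max a

theorem pvMaxFrom_cons (p : Int × Int × Int → Bool) (t : Int × Int × Int)
    (cs : List (Int × Int × Int)) (a : Int) :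
    pvMaxFrom p (t :: cs) a = if p t then pvMaxFrom p cs (max a t.1) else pvMaxFrom p cs a := by
  simp only [pvMaxFrom, List.filter_cons]
  split_ifs with h <;> simp

-- A's fused loop computes the three filtered maxima, componentwise
theorem loop_eq (data : List (String × List (String × List Int))) :
    ∀ (a b c : Int),
    data.foldl (fun (acc : Int × Int × Int) fr =>
      let np := pvLen fr.2 "person"
      let nh := pvLen fr.2 "head"
      let nf := pvLen fr.2 "face"
      (if np == nh && nh == nf then max acc.1 np else acc.1,
       if np == nh then max acc.2.1 np else acc.2.1,
       if np == nf then max acc.2.2 np else acc.2.2)) (a, b, c)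
    = (pvMaxFrom (fun t => t.1 == t.2.1 && t.2.1 == t.2.2) (pvCounts data) a,
       pvMaxFrom (fun t => t.1 == t.2.1) (pvCounts data) b,
       pvMaxFrom (fun t => t.1 == t.2.2) (pvCounts data) c) := by
  induction data with
  | nil => intro a b c; simp [pvCounts, pvMaxFrom]
  | cons fr rest ih =>
    intro a b c
    simp only [pvCounts] at ih ⊢
    simp only [List.map_cons, List.foldl_cons, pvMaxFrom_cons, ih]
    split_ifs <;> rfl

-- folding max over a list of elements all ≤ a keeps a
theorem foldl_max_of_forall_le (l : List Int) (a : Int) (h : ∀ x ∈ l, x ≤ a) :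
    l.foldl max a = a := by
  induction l with
  | nil => rfl
  | cons x l ih =>
    simp only [List.foldl_cons]
    rw [max_eq_left (h x (by simp))]
    exact ih (fun y hy => h y (by simp [hy]))

-- in a list whose fsts are non-increasing and nonnegative, the first match is the filtered max
theorem first_eq_max (p : Int × Int × Int → Bool) :
    ∀ (ss : List (Int × Int × Int)),
    ss.Pairwise (fun a b => b.1 ≤ a.1) → (∀ t ∈ ss, 0 ≤ t.1) →
    pvFirst p ss = pvMaxFrom p ss 0 := by
  intro ss
  induction ss with
  | nil => intro _ _; rfl
  | cons t ss ih =>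
    intro hpw hnn
    rcases List.pairwise_cons.mp hpw with ⟨hle, hpw'⟩
    by_cases hp : p t
    · have h0 : max (0 : Int) t.1 = t.1 := max_eq_right (hnn t (by simp))
      have hfold : pvMaxFrom p ss t.1 = t.1 :=
        foldl_max_of_forall_le _ _ (by
          intro x hx
          rcases List.mem_map.mp hx with ⟨u, hu, rfl⟩
          exact hle u (List.mem_of_mem_filter hu))
      simp [pvFirst, hp, pvMaxFrom_cons, h0, hfold]
    · have hfind : pvFirst p (t :: ss) = pvFirst p ss := by
        simp [pvFirst, hp]
      rw [hfind, pvMaxFrom_cons, if_neg hp]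
      exact ih hpw' (fun u hu => hnn u (by simp [hu]))

-- folding max from the same start over permuted lists agrees
theorem foldl_max_perm {l₁ l₂ : List Int} (h : l₁.Perm l₂) (a : Int) :
    l₁.foldl max a = l₂.foldl max a :=
  h.foldl_eq a

-- the three plans, named
def pvPlan (p : Int × Int × Int → Bool) (data : List (String × List (String × List Int))) : Int :=
  pvMaxFrom p (pvCounts data) 0

-- B's first-match over the sorted triples equals A's filtered maximum
theorem pvFirst_sorted_eq_plan (p : Int × Int × Int → Bool)
    (data : List (String × List (String × List Int))) :
    pvFirst p (PySem.List.sorted (pvCounts data) (fun t => t.1) true) = pvPlan p data := by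
  have hperm := PySem.List.sorted_perm (pvCounts data) (fun t => t.1) true
  have hnn : ∀ t ∈ PySem.List.sorted (pvCounts data) (fun t => t.1) true, 0 ≤ t.1 := by
    intro t ht
    have := hperm.mem_iff.mp ht
    rcases List.mem_map.mp this with ⟨fr, _, rfl⟩
    exact Int.natCast_nonneg _
  rw [first_eq_max p _ (PySem.List.sorted_pairwise_rev (pvCounts data) (fun t => t.1)) hnn]
  unfold pvPlan pvMaxFrom
  exact foldl_max_perm (((hperm.filter p).map Prod.fst)) 0

-- ===== VERDICT (by name: the statement is the Claim_ definition above) =====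
theorem estimate_num_people_spec : Claim_equal_estimate_num_people := by
  intro data _
  show estimate_num_people data = estimate_num_people_alt data
  simp only [estimate_num_people, estimate_num_people_alt, loop_eq,
    List.findSome?, pvFirst_sorted_eq_plan]
  by_cases hA : pvMaxFrom (fun t : Int × Int × Int => t.1 == t.2.1 && t.2.1 == t.2.2) (pvCounts data) 0 = 0 <;>
    by_cases hB : pvMaxFrom (fun t : Int × Int × Int => t.1 == t.2.1) (pvCounts data) 0 = 0 <;>
      by_cases hC : pvMaxFrom (fun t : Int × Int × Int => t.1 == t.2.2) (pvCounts data) 0 = 0 <;>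
        simp [pvPlan, hA, hB, hC]
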